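-- pv_equiv track=rewrite | github.com/yahyamissaouii/Peptide-Encoding-Schemes-Evaluation-Pipeline | src/error_correction/interleave.py | deinterleave_bits
-- ===== SOURCE A (Python) =====
-- def deinterleave_bits(bits: str, depth: int = 1) -> str:
--     """
--     Reverse of `interleave_bits`.
--     """
--     if depth <= 1 or not bits:
--         return bits
--
--     q, r = divmod(len(bits), depth)
--     rows = []
--     idx = 0
--     for i in range(depth):
--         row_len = q + (1 if i < r else 0)
--         rows.append(bits[idx:idx + row_len])
--         idx += row_len
--
--     out = []
--     max_len = max(len(r) for r in rows)
--     for i in range(max_len):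
--         for r in rows:
--             if i < len(r):
--                 out.append(r[i])
--     return "".join(out)
-- ===== SOURCE B (Python) =====
-- def deinterleave_bits(bits: str, depth: int = 1) -> str:
--     """
--     Reverse of `interleave_bits` via flat index arithmetic: no rows list is
--     built; offset[i] is the start of row i and character k of the output is
--     bits[offset[k % depth] + k // depth].
--     """
--     if depth <= 1 or not bits:
--         return bits
--     n = len(bits)
--     q, r = divmod(n, depth)
--     offset = [i * q + min(i, r) for i in range(depth)]
--     return "".join(bits[offset[k % depth] + k // depth] for k in range(n))
-- ===== Notes on version B (the rewrite author's own statement) =====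
-- stated objective: alternative
-- what changed: B replaces A's two-phase algorithm (slice the string into depth row strings, then nested loops reading the rows column-major with a per-row length test) by a single flat pass that computes each output character's source index arithmetically as offset[k % depth] + k // depth from a precomputed row-start offset array, never materialising rows.
import Mathlib
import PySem

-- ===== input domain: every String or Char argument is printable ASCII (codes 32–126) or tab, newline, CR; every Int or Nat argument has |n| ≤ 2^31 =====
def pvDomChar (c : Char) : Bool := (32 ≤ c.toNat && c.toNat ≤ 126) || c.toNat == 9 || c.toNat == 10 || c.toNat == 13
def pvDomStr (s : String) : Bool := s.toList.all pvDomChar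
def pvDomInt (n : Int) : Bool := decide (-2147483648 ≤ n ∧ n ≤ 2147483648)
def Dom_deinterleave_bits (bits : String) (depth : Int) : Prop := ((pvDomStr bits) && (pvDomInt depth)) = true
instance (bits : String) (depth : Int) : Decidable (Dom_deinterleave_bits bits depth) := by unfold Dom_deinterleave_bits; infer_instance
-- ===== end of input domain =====

-- B replaces A's rows-slicing plus nested column-major scan by one flat pass using
-- index arithmetic (offset[k % depth] + k // depth); alternative decomposition, same cost.

-- ===== PORT A =====
def deinterleave_bits (bits : String) (depth : Int) : String :=
  if depth ≤ 1 ∨ PySem.Str.len bits = 0 then bits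
  else
    let cs := bits.toList
    let n : Int := PySem.Str.len bits
    let q := PySem.Int.floordiv n depth
    let r := PySem.Int.mod n depth
    let st := (PySem.List.pyRange 0 depth 1).foldl
      (fun (st : List (List Char) × Int) i =>
        let rowLen := q + (if i < r then 1 else 0)
        (st.1 ++ [PySem.List.slice cs (some st.2) (some (st.2 + rowLen))], st.2 + rowLen))
      ([], 0)
    let rows := st.1
    let maxLen : Int :=
      match PySem.List.max? (rows.map (fun row => PySem.Chars.len row)) (fun x => x) with
      | some m => m
      | none => 0
    let out := (PySem.List.pyRange 0 maxLen 1).foldl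
      (fun acc i => rows.foldl
        (fun acc row => if i < PySem.Chars.len row then acc ++ [PySem.List.pyGetD row i ' '] else acc)
        acc) ([] : List Char)
    String.ofList out

-- ===== PORT B =====
def deinterleave_bits_alt (bits : String) (depth : Int) : String :=
  if depth ≤ 1 ∨ PySem.Str.len bits = 0 then bits
  else
    let cs := bits.toList
    let n : Int := PySem.Str.len bits
    let q := PySem.Int.floordiv n depth
    let r := PySem.Int.mod n depth
    let offset := (PySem.List.pyRange 0 depth 1).map (fun i => i * q + min i r)
    String.ofList ((PySem.List.pyRange 0 n 1).map (fun k =>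
      PySem.List.pyGetD cs (PySem.List.pyGetD offset (PySem.Int.mod k depth) 0 + PySem.Int.floordiv k depth) ' '))


-- ===== PRECONDITION & SPEC =====
def Spec_deinterleave_bits (bits : String) (depth : Int) (out : String) : Prop := out = deinterleave_bits_alt bits depth
instance (bits : String) (depth : Int) (out : String) : Decidable (Spec_deinterleave_bits bits depth out) := by unfold Spec_deinterleave_bits; infer_instance

-- ===== CLAIM (what is proved, stated in full; the proofs are below) =====
def Claim_equal_deinterleave_bits : Prop := ∀ (bits : String) (depth : Int), Dom_deinterleave_bits bits depth → Spec_deinterleave_bits bits depth (deinterleave_bits bits depth)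

-- ===== LEMMAS AND PROOFS =====
-- helpers for the proof
def dOff (qN rN i : Nat) : Nat := i * qN + min i rN
def dRlen (qN rN i : Nat) : Nat := qN + if i < rN then 1 else 0
def dCnt (D qN rN i : Nat) : Nat := if i < qN then D else rN
def dM (qN rN : Nat) : Nat := qN + if 0 < rN then 1 else 0
def dCol (cs : List Char) (D qN rN : Nat) : List Char :=
  (List.range (dM qN rN)).flatMap (fun i =>
    (List.range (dCnt D qN rN i)).map (fun j => cs.getD (dOff qN rN j + i) ' '))

theorem dOff_succ (qN rN m : Nat) : dOff qN rN (m+1) = dOff qN rN m + dRlen qN rN m := by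
  simp only [dOff, dRlen, Nat.succ_mul, Nat.min_def]; split_ifs <;> omega

theorem dOff_add_rlen_le (D qN rN i : Nat) (hi : i < D) (hr : rN < D) :
    dOff qN rN i + dRlen qN rN i ≤ D * qN + rN := by
  have h1 : (i+1) * qN ≤ D * qN := Nat.mul_le_mul_right _ (by omega)
  simp only [Nat.succ_mul] at h1
  simp only [dOff, dRlen, Nat.min_def]; split_ifs <;> omega

theorem dRlen_le (qN rN i : Nat) : dRlen qN rN i ≤ dM qN rN := by
  simp only [dRlen, dM]; split_ifs <;> omega

theorem rowsFold (cs : List Char) (qN rN : Nat) (m : Nat) :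
    ((List.range m).map (fun (k : Nat) => (k : Int))).foldl
      (fun (st : List (List Char) × Int) i =>
        (st.1 ++ [PySem.List.slice cs (some st.2) (some (st.2 + ((qN:Int) + if i < (rN:Int) then 1 else 0)))],
         st.2 + ((qN:Int) + if i < (rN:Int) then 1 else 0)))
      ([], 0)
    = ((List.range m).map (fun i => (cs.drop (dOff qN rN i)).take (dRlen qN rN i)),
       ((dOff qN rN m : Nat) : Int)) := by
  induction m with
  | zero => simp [dOff]
  | succ m ih =>
    rw [List.range_succ, List.map_append, List.foldl_append, ih]
    have hif : ((qN:Int) + if (m:Int) < (rN:Int) then 1 else 0) = ((dRlen qN rN m : Nat) : Int) := by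
      simp only [dRlen]; split_ifs with h h' h' <;> push_cast <;> omega
    simp only [List.map_cons, List.map_nil, List.foldl_cons, List.foldl_nil, hif]
    rw [PySem.List.slice_natCast_add, List.map_append]
    simp [dOff_succ]

theorem filter_range_lt (D rN : Nat) (h : rN ≤ D) :
    (List.range D).filter (fun j => decide (j < rN)) = List.range rN := by
  obtain ⟨k, rfl⟩ := Nat.exists_eq_add_of_le h
  rw [List.range_add, List.filter_append]
  rw [List.filter_eq_self.mpr (by intro a ha; simp at ha ⊢; omega)]
  rw [List.filter_eq_nil_iff.mpr (by intro a ha; simp at ha ⊢; omega)]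
  simp

theorem range_flatMap_full (D : Nat) (c : Nat) :
    (List.range c).flatMap (fun i => (List.range D).map (fun j => i * D + j)) = List.range (c * D) := by
  induction c with
  | zero => simp
  | succ c ih =>
    rw [List.range_succ, List.flatMap_append, ih, List.flatMap_cons, List.flatMap_nil,
        List.append_nil, Nat.succ_mul, List.range_add]

theorem range_flat (D qN rN N : Nat) (hD : 0 < D) (hq : N = D * qN + rN) (hr : rN < D)
    (g : Nat → Char) :
    (List.range (dM qN rN)).flatMap (fun i =>
      (List.range (dCnt D qN rN i)).map (fun j => g (i * D + j))) = (List.range N).map g := by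
  have key : (List.range (dM qN rN)).flatMap (fun i =>
      (List.range (dCnt D qN rN i)).map (fun j => i * D + j)) = List.range N := by
    by_cases h0 : 0 < rN
    · have hM : dM qN rN = qN + 1 := by simp [dM, h0]
      rw [hM, List.range_succ, List.flatMap_append,
          List.flatMap_congr (g := fun i => (List.range D).map (fun j => i * D + j))
            (by intro i hi; simp at hi; simp [dCnt, hi]),
          range_flatMap_full, List.flatMap_cons, List.flatMap_nil, List.append_nil]
      have hcq : dCnt D qN rN qN = rN := by simp [dCnt]
      rw [hcq, hq, Nat.mul_comm, List.range_add]
    · have hr0 : rN = 0 := by omega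
      have hM : dM qN rN = qN := by simp [dM, hr0]
      rw [hM, List.flatMap_congr (g := fun i => (List.range D).map (fun j => i * D + j))
            (by intro i hi; simp at hi; simp [dCnt, hi]),
          range_flatMap_full, hq, hr0, Nat.mul_comm]
      simp
  calc (List.range (dM qN rN)).flatMap (fun i =>
      (List.range (dCnt D qN rN i)).map (fun j => g (i * D + j)))
      = ((List.range (dM qN rN)).flatMap (fun i =>
          (List.range (dCnt D qN rN i)).map (fun j => i * D + j))).map g := by
        rw [List.map_flatMap]; apply List.flatMap_congr; intro i _; rw [List.map_map]; rfl
    _ = (List.range N).map g := by rw [key]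

theorem col_eq (cs : List Char) (D N : Nat) (hD : 2 ≤ D) (hN : cs.length = N) :
    (List.range N).map (fun k => cs.getD (dOff (N / D) (N % D) (k % D) + k / D) ' ')
      = dCol cs D (N / D) (N % D) := by
  have hq : N = D * (N / D) + N % D := (Nat.div_add_mod N D).symm
  have hr : N % D < D := Nat.mod_lt _ (by omega)
  rw [← range_flat D (N / D) (N % D) N (by omega) hq hr
        (fun k => cs.getD (dOff (N / D) (N % D) (k % D) + k / D) ' ')]
  unfold dCol
  apply List.flatMap_congr; intro i hi
  apply List.map_congr_left; intro j hj
  simp only [List.mem_range] at hi hj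
  have hjD : j < D := lt_of_lt_of_le hj (by unfold dCnt; split_ifs <;> omega)
  have h1 : (i * D + j) % D = j := by
    rw [Nat.mul_comm, Nat.mul_add_mod, Nat.mod_eq_of_lt hjD]
  have h2 : (i * D + j) / D = i := by
    rw [Nat.mul_comm, Nat.mul_add_div (by omega), Nat.div_eq_of_lt hjD]
    omega
  rw [h1, h2]

theorem max?_eq_of_mem_ub (l : List Int) (M : Int) (hmem : M ∈ l) (hub : ∀ y ∈ l, y ≤ M) :
    PySem.List.max? l (fun x => x) = some M := by
  cases hml : PySem.List.max? l (fun x => x) with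
  | none =>
    rw [PySem.List.max?_eq_none_iff] at hml
    subst hml; cases hmem
  | some m =>
    have h1 := PySem.List.max?_isMax hml
    have h2 := PySem.List.max?_mem hml
    simp only [Option.some.injEq]
    exact le_antisymm (hub m h2) (h1 M hmem)

theorem guard_neg (D N : Nat) (hD : 2 ≤ D) (h1 : 1 ≤ N) (bits : String)
    (hN : bits.toList.length = N) : ¬ ((D : Int) ≤ 1 ∨ PySem.Str.len bits = 0) := by
  rw [PySem.Str.len_eq, hN]; push_neg; omega

theorem A_eq (bits : String) (D N : Nat) (hD : 2 ≤ D) (hN : bits.toList.length = N) (h1 : 1 ≤ N) :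
    deinterleave_bits bits (D : Int) = String.ofList (dCol bits.toList D (N / D) (N % D)) := by
  have hg := guard_neg D N hD h1 bits hN
  set qN := N / D with hqN
  set rN := N % D with hrN
  have hrD : rN < D := Nat.mod_lt _ (by omega)
  have hsum : D * qN + rN = N := Nat.div_add_mod N D
  have hrow : ∀ i, i < D → ((bits.toList.drop (dOff qN rN i)).take (dRlen qN rN i)).length = dRlen qN rN i := by
    intro i hi
    have h2 := dOff_add_rlen_le D qN rN i hi hrD
    simp only [List.length_take, List.length_drop, hN]
    omega
  have helem : ∀ i j, j < D → i < dRlen qN rN j →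
      PySem.List.pyGetD ((bits.toList.drop (dOff qN rN j)).take (dRlen qN rN j)) (i : Int) ' ' =
        bits.toList.getD (dOff qN rN j + i) ' ' := by
    intro i j hj hij
    rw [PySem.List.pyGetD_natCast, List.getD_eq_getElem?_getD, List.getD_eq_getElem?_getD,
        List.getElem?_take, if_pos hij, List.getElem?_drop]
  unfold deinterleave_bits
  rw [if_neg hg]
  simp only [PySem.Str.len_eq, hN, PySem.Int.floordiv_natCast, PySem.Int.mod_natCast,
             PySem.List.pyRange_zero_nat]
  rw [rowsFold]
  simp only [List.map_map, PySem.Chars.len_eq, Function.comp_def]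
  have hmax : PySem.List.max? ((List.range D).map
        (fun i => ((((bits.toList.drop (dOff qN rN i)).take (dRlen qN rN i)).length : Nat) : Int)))
        (fun x => x) = some ((dM qN rN : Nat) : Int) := by
    apply max?_eq_of_mem_ub
    · refine List.mem_map.mpr ⟨0, List.mem_range.mpr (by omega), ?_⟩
      rw [hrow 0 (by omega)]
      rfl
    · intro y hy
      obtain ⟨j, hj, hv⟩ := List.mem_map.mp hy
      simp only [List.mem_range] at hj
      rw [← hv, hrow j hj]
      exact_mod_cast dRlen_le qN rN j
  rw [hmax]
  have hout : ∀ (rows : List (List Char)) (M : Nat),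
      List.foldl (fun (acc : List Char) (i : Nat) => rows.foldl
        (fun acc row => if (i : Int) < ((row.length : Nat) : Int) then acc ++ [PySem.List.pyGetD row (i : Int) ' '] else acc) acc) [] (List.range M)
      = List.flatMap (fun (i : Nat) =>
          (rows.filter (fun row => decide ((i : Int) < ((row.length : Nat) : Int)))).map
            (fun row => PySem.List.pyGetD row (i : Int) ' ')) (List.range M) := by
    intro rows M
    simp only [PySem.List.foldl_append_ite, PySem.List.foldl_append_eq_flatMap, List.nil_append]
  rw [PySem.List.pyRange_zero_nat, List.foldl_map]
  apply congrArg
  refine (hout ((List.range D).map (fun i => (bits.toList.drop (dOff qN rN i)).take (dRlen qN rN i))) (dM qN rN)).trans ?_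
  unfold dCol
  apply List.flatMap_congr; intro i hi
  simp only [List.mem_range] at hi
  rw [List.filter_map, List.map_map]
  rw [List.filter_congr (q := fun j => decide (i < dRlen qN rN j))
      (by intro j hj; simp only [List.mem_range] at hj
          simp only [Function.comp_apply, hrow j hj, decide_eq_decide, Nat.cast_lt])]
  by_cases hiq : i < qN
  · rw [List.filter_eq_self.mpr
        (by intro j hj; simp only [decide_eq_true_eq, dRlen]; split_ifs <;> omega)]
    rw [show dCnt D qN rN i = D from by simp [dCnt, hiq]]
    apply List.map_congr_left; intro j hj
    simp only [List.mem_range] at hj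
    exact helem i j hj (by simp only [dRlen]; split_ifs <;> omega)
  · have hiq' : i = qN := by
      simp only [dM] at hi; split_ifs at hi <;> omega
    have h0r : 0 < rN := by
      simp only [dM] at hi; split_ifs at hi <;> omega
    rw [List.filter_congr (q := fun j => decide (j < rN))
        (by intro j hj; simp only [List.mem_range] at hj
            simp only [decide_eq_decide, dRlen, hiq']; split_ifs <;> omega)]
    rw [filter_range_lt D rN (by omega)]
    rw [show dCnt D qN rN i = rN from by simp [dCnt, hiq]]
    apply List.map_congr_left; intro j hj
    simp only [List.mem_range] at hj
    exact helem i j (by omega) (by simp only [dRlen, hiq']; split_ifs <;> omega)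

theorem B_eq (bits : String) (D N : Nat) (hD : 2 ≤ D) (hN : bits.toList.length = N) (h1 : 1 ≤ N) :
    deinterleave_bits_alt bits (D : Int) = String.ofList (dCol bits.toList D (N / D) (N % D)) := by
  have hg := guard_neg D N hD h1 bits hN
  unfold deinterleave_bits_alt
  rw [if_neg hg]
  simp only [PySem.Str.len_eq, hN, PySem.Int.floordiv_natCast, PySem.Int.mod_natCast,
             PySem.List.pyRange_zero_nat, List.map_map]
  rw [← col_eq bits.toList D N hD hN]
  apply congrArg
  apply List.map_congr_left; intro k hk
  simp only [List.mem_range] at hk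
  simp only [Function.comp_apply, PySem.Int.mod_natCast, PySem.Int.floordiv_natCast,
             PySem.List.pyGetD_natCast]
  rw [PySem.List.getD_map_range _ _ _ _ (Nat.mod_lt k (by omega : 0 < D))]
  simp only [Function.comp_apply]
  rw [show ((k % D : Nat) : Int) * ((N / D : Nat) : Int) + min ((k % D : Nat) : Int) ((N % D : Nat) : Int)
        + ((k / D : Nat) : Int) = ((k % D * (N / D) + min (k % D) (N % D) + k / D : Nat) : Int) from by
      push_cast; ring]
  rw [PySem.List.pyGetD_natCast]
  simp [dOff]

theorem deinterleave_main (bits : String) (depth : Int) :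
    deinterleave_bits bits depth = deinterleave_bits_alt bits depth := by
  by_cases hg : depth ≤ 1 ∨ PySem.Str.len bits = 0
  · rw [deinterleave_bits, deinterleave_bits_alt, if_pos hg, if_pos hg]
  · push_neg at hg
    have hd1 : 1 < depth := by omega
    have hD : depth = ((depth.toNat : Nat) : Int) := by omega
    have h2 : 2 ≤ depth.toNat := by omega
    have hlen : 1 ≤ bits.toList.length := by
      rcases hg with ⟨_, h⟩
      rw [PySem.Str.len_eq] at h
      by_contra hc; apply h; simp; omega
    rw [hD, A_eq bits depth.toNat bits.toList.length h2 rfl hlen,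
        B_eq bits depth.toNat bits.toList.length h2 rfl hlen]

-- ===== VERDICT (by name: the statement is the Claim_ definition above) =====
theorem deinterleave_bits_spec : Claim_equal_deinterleave_bits := by
  intro bits depth _
  unfold Spec_deinterleave_bits
  exact deinterleave_main bits depth
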